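-- pv_equiv track=rewrite | github.com/ladium493/VLSIhw | kernel.py | dividable_check
-- ===== SOURCE A (Python) =====
-- def dividable_check(m):
--     i = 0
--     indexList = []
--     while i < len(m[0]):
--         c = 0
--         for a in m:
--             if a[i] == 1:
--                 c += 1
--         if c >= 2:
--             indexList.append(i)
--         i += 1
--     if indexList:
--         return indexList
--     else:
--         return None
-- ===== SOURCE B (Python) =====
-- def dividable_check(m):
--     w = len(m[0])
--     seen = set()
--     dup = set()
--     for row in m:
--         for i in range(w):
--             if row[i] == 1:
--                 if i in seen:
--                     dup.add(i)
--                 else: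
--                     seen.add(i)
--     result = sorted(dup)
--     return result if result else None
-- ===== Notes on version B (the rewrite author's own statement) =====
-- stated objective: alternative
-- what changed: A keeps an integer counter per column, re-scanning all rows for each column; B keeps no counts at all: a single row-major pass over the matrix with two sets ('seen' = columns where a 1 has appeared, 'dup' = columns where a 1 repeated), returning sorted(dup) - duplicate detection by set membership instead of tallying.
import Mathlib
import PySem

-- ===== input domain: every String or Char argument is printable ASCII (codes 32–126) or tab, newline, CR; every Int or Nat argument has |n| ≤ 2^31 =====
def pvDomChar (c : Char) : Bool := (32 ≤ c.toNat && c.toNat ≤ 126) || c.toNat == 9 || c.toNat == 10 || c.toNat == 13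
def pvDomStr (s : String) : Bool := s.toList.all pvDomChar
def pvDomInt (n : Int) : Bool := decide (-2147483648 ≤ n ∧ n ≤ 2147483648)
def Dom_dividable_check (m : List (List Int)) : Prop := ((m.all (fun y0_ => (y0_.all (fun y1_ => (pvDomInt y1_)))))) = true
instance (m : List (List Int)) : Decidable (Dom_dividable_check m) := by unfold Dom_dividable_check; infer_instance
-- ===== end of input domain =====

-- B drops A's per-column counters entirely: one row-major pass over the matrix with two SETS
-- ('seen' = columns with a 1 so far, 'dup' = columns whose 1 repeats), then sorted(dup) (alternative).

-- ===== PORT A =====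
def dividable_check (m : List (List Int)) : Option (List Int) :=
  let indexList : List Int :=
    (PySem.List.pyRange 0 ((PySem.List.pyGetD m 0 []).length : Int) 1).foldl
      (fun acc i =>
        let c : Int := m.foldl (fun c a => if PySem.List.pyGetD a i 0 = 1 then c + 1 else c) 0
        if c ≥ 2 then acc ++ [i] else acc) []
  if indexList ≠ [] then some indexList else none

-- ===== PORT B =====
def dividable_check_alt (m : List (List Int)) : Option (List Int) :=
  let w : Nat := (PySem.List.pyGetD m 0 []).length
  let sd : PySem.Set Int × PySem.Set Int := m.foldl
    (fun sd row =>
      (PySem.List.pyRange 0 (w : Int) 1).foldl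
        (fun sd i =>
          if PySem.List.pyGetD row i 0 = 1 then
            if PySem.Set.contains sd.1 i then (sd.1, PySem.Set.add sd.2 i)
            else (PySem.Set.add sd.1 i, sd.2)
          else sd) sd)
    (PySem.Set.empty, PySem.Set.empty)
  -- sorted(dup): consuming the set through 'sorted' without a key, order-independent
  let result : List Int := PySem.List.sorted sd.2 (fun x => x) false
  if result ≠ [] then some result else none

-- ===== PRECONDITION & SPEC =====
-- Pre_ excludes exactly the inputs where the Python A raises IndexError: an empty matrix
-- (m[0]) or a row shorter than the first row (a[i]); B raises on exactly the same inputs.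
def Pre_dividable_check (m : List (List Int)) : Prop :=
  m ≠ [] ∧ ∀ r ∈ m, (m.headD []).length ≤ r.length
instance (m : List (List Int)) : Decidable (Pre_dividable_check m) := by
  unfold Pre_dividable_check; infer_instance

def pvWitness_dividable_check : List (List Int) := [[1, 0], [1, 1]]

def Spec_dividable_check (m : List (List Int)) (out : Option (List Int)) : Prop := out = dividable_check_alt m
instance (m : List (List Int)) (out : Option (List Int)) : Decidable (Spec_dividable_check m out) := by unfold Spec_dividable_check; infer_instance

-- ===== CLAIM (what is proved, stated in full; the proofs are below) =====
def Claim_equal_dividable_check : Prop := ∀ (m : List (List Int)), Dom_dividable_check m → Pre_dividable_check m → Spec_dividable_check m (dividable_check m)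

-- ===== LEMMAS AND PROOFS =====

-- the number of rows of `rows` whose entry in column j equals 1 (A's inner counter)
def pvCnt (rows : List (List Int)) (j : Int) : Int :=
  rows.foldl (fun c a => if PySem.List.pyGetD a j 0 = 1 then c + 1 else c) 0

lemma pvCnt_shift (rows : List (List Int)) (j : Int) (c : Int) :
    rows.foldl (fun c a => if PySem.List.pyGetD a j 0 = 1 then c + 1 else c) c
      = c + pvCnt rows j := by
  induction rows generalizing c with
  | nil => simp [pvCnt]
  | cons r rs ih =>
      have h1 : (r :: rs).foldl (fun c a => if PySem.List.pyGetD a j 0 = 1 then c + 1 else c) c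
          = (if PySem.List.pyGetD r j 0 = 1 then c + 1 else c) + pvCnt rs j := by
        rw [List.foldl_cons, ih]
      have h2 : pvCnt (r :: rs) j
          = (if PySem.List.pyGetD r j 0 = 1 then (0 : Int) + 1 else (0 : Int)) + pvCnt rs j := by
        show rs.foldl _ (if PySem.List.pyGetD r j 0 = 1 then (0 : Int) + 1 else (0 : Int)) = _
        rw [ih]
      rw [h1, h2]
      split <;> ring

lemma pvCnt_cons (row : List Int) (rows : List (List Int)) (j : Int) :
    pvCnt (row :: rows) j
      = (if PySem.List.pyGetD row j 0 = 1 then (1 : Int) else 0) + pvCnt rows j := by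
  show rows.foldl _ (if PySem.List.pyGetD row j 0 = 1 then (0 : Int) + 1 else 0) = _
  rw [pvCnt_shift]
  split <;> ring

lemma pvCnt_nonneg (rows : List (List Int)) (j : Int) : 0 ≤ pvCnt rows j := by
  induction rows with
  | nil => simp [pvCnt]
  | cons r rs ih => rw [pvCnt_cons]; split <;> omega

-- B's inner per-row pass over the index list ns: membership in the two sets afterwards
lemma inner_sets (row : List Int) (ns : List Int) (seen dup : PySem.Set Int)
    (hnd : ns.Nodup) (hs : seen.Nodup) (hd : dup.Nodup) :
    let out := ns.foldl (fun sd i =>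
        if PySem.List.pyGetD row i 0 = 1 then
          if PySem.Set.contains sd.1 i then (sd.1, PySem.Set.add sd.2 i)
          else (PySem.Set.add sd.1 i, sd.2)
        else sd) (seen, dup)
    out.1.Nodup ∧ out.2.Nodup
    ∧ (∀ j : Int, j ∈ out.1 ↔ j ∈ seen ∨ (j ∈ ns ∧ PySem.List.pyGetD row j 0 = 1))
    ∧ (∀ j : Int, j ∈ out.2 ↔ j ∈ dup ∨ (j ∈ seen ∧ j ∈ ns ∧ PySem.List.pyGetD row j 0 = 1)) := by
  induction ns generalizing seen dup with
  | nil => exact ⟨hs, hd, fun j => by simp, fun j => by simp⟩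
  | cons x xs ih =>
      have hxxs : x ∉ xs := (List.nodup_cons.mp hnd).1
      by_cases hP : PySem.List.pyGetD row x 0 = 1
      · by_cases hxseen : x ∈ seen
        · -- x already seen: dup gains x
          have hc : PySem.Set.contains seen x = true := (PySem.Set.contains_iff seen x).mpr hxseen
          have := ih seen (PySem.Set.add dup x) (List.Nodup.of_cons hnd) hs
            (PySem.Set.nodup_add dup x hd)
          simp only [List.foldl_cons, hP, hc, ite_true] at this ⊢
          refine ⟨this.1, this.2.1, fun j => ?_, fun j => ?_⟩
          · rw [this.2.2.1 j]
            constructor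
            · rintro (h | ⟨h1, h2⟩)
              · exact Or.inl h
              · exact Or.inr ⟨List.mem_cons_of_mem _ h1, h2⟩
            · rintro (h | ⟨h1, h2⟩)
              · exact Or.inl h
              · rcases List.mem_cons.mp h1 with rfl | h1
                · exact Or.inl hxseen
                · exact Or.inr ⟨h1, h2⟩
          · rw [this.2.2.2 j, PySem.Set.mem_add]
            constructor
            · rintro ((h | rfl) | ⟨h1, h2, h3⟩)
              · exact Or.inl h
              · exact Or.inr ⟨hxseen, List.mem_cons_self, hP⟩
              · exact Or.inr ⟨h1, List.mem_cons_of_mem _ h2, h3⟩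
            · rintro (h | ⟨h1, h2, h3⟩)
              · exact Or.inl (Or.inl h)
              · rcases List.mem_cons.mp h2 with rfl | h2
                · exact Or.inl (Or.inr rfl)
                · exact Or.inr ⟨h1, h2, h3⟩
        · -- first 1 in column x: seen gains x
          have hc : PySem.Set.contains seen x = false := by
            rcases h : PySem.Set.contains seen x with _ | _
            · rfl
            · exact absurd ((PySem.Set.contains_iff seen x).mp h) hxseen
          have := ih (PySem.Set.add seen x) dup (List.Nodup.of_cons hnd)
            (PySem.Set.nodup_add seen x hs) hd
          simp only [List.foldl_cons, hP, hc, ite_true, ite_false, Bool.false_eq_true] at this ⊢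
          refine ⟨this.1, this.2.1, fun j => ?_, fun j => ?_⟩
          · rw [this.2.2.1 j, PySem.Set.mem_add]
            constructor
            · rintro ((h | rfl) | ⟨h1, h2⟩)
              · exact Or.inl h
              · exact Or.inr ⟨List.mem_cons_self, hP⟩
              · exact Or.inr ⟨List.mem_cons_of_mem _ h1, h2⟩
            · rintro (h | ⟨h1, h2⟩)
              · exact Or.inl (Or.inl h)
              · rcases List.mem_cons.mp h1 with rfl | h1
                · exact Or.inl (Or.inr rfl)
                · exact Or.inr ⟨h1, h2⟩
          · rw [this.2.2.2 j]
            constructor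
            · rintro (h | ⟨h1, h2, h3⟩)
              · exact Or.inl h
              · rcases PySem.Set.mem_add seen x j |>.mp h1 with h1 | rfl
                · exact Or.inr ⟨h1, List.mem_cons_of_mem _ h2, h3⟩
                · exact absurd h2 hxxs
            · rintro (h | ⟨h1, h2, h3⟩)
              · exact Or.inl h
              · rcases List.mem_cons.mp h2 with rfl | h2
                · exact absurd h1 hxseen
                · exact Or.inr ⟨(PySem.Set.mem_add seen x j).mpr (Or.inl h1), h2, h3⟩
      · -- row has no 1 in column x: state unchanged at this step
        have := ih seen dup (List.Nodup.of_cons hnd) hs hd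
        simp only [List.foldl_cons, hP, ite_false] at this ⊢
        refine ⟨this.1, this.2.1, fun j => ?_, fun j => ?_⟩
        · rw [this.2.2.1 j]
          constructor
          · rintro (h | ⟨h1, h2⟩)
            · exact Or.inl h
            · exact Or.inr ⟨List.mem_cons_of_mem _ h1, h2⟩
          · rintro (h | ⟨h1, h2⟩)
            · exact Or.inl h
            · rcases List.mem_cons.mp h1 with rfl | h1
              · exact absurd h2 hP
              · exact Or.inr ⟨h1, h2⟩
        · rw [this.2.2.2 j]
          constructor
          · rintro (h | ⟨h1, h2, h3⟩)
            · exact Or.inl h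
            · exact Or.inr ⟨h1, List.mem_cons_of_mem _ h2, h3⟩
          · rintro (h | ⟨h1, h2, h3⟩)
            · exact Or.inl h
            · rcases List.mem_cons.mp h2 with rfl | h2
              · exact absurd h3 hP
              · exact Or.inr ⟨h1, h2, h3⟩

-- B's outer pass over the rows: the two sets collect columns with ≥1 resp. ≥2 ones
lemma outer_sets (rows : List (List Int)) (w : Nat) (seen dup : PySem.Set Int)
    (hs : seen.Nodup) (hd : dup.Nodup) :
    let out := rows.foldl (fun sd row =>
        (PySem.List.pyRange 0 (w : Int) 1).foldl (fun sd i =>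
          if PySem.List.pyGetD row i 0 = 1 then
            if PySem.Set.contains sd.1 i then (sd.1, PySem.Set.add sd.2 i)
            else (PySem.Set.add sd.1 i, sd.2)
          else sd) sd) (seen, dup)
    out.1.Nodup ∧ out.2.Nodup
    ∧ (∀ j : Int, j ∈ out.1 ↔ j ∈ seen ∨ (0 ≤ j ∧ j < (w : Int) ∧ 1 ≤ pvCnt rows j))
    ∧ (∀ j : Int, j ∈ out.2 ↔ j ∈ dup
        ∨ (j ∈ seen ∧ 0 ≤ j ∧ j < (w : Int) ∧ 1 ≤ pvCnt rows j)
        ∨ (0 ≤ j ∧ j < (w : Int) ∧ 2 ≤ pvCnt rows j)) := by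
  induction rows generalizing seen dup with
  | nil =>
      exact ⟨hs, hd, fun j => by simp [pvCnt], fun j => by simp [pvCnt]⟩
  | cons row rs ih =>
      have hin := inner_sets row (PySem.List.pyRange 0 (w : Int) 1) seen dup
        (PySem.List.nodup_pyRange_one 0 (w : Int)) hs hd
      have hout := ih _ _ hin.1 hin.2.1
      dsimp only at hin hout ⊢
      rw [List.foldl_cons]
      refine ⟨hout.1, hout.2.1, fun j => ?_, fun j => ?_⟩
      all_goals
        have hnn := pvCnt_nonneg rs j
        have hcc := pvCnt_cons row rs j
        by_cases hP : PySem.List.pyGetD row j 0 = 1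
      · -- seen, row has a 1 in column j
        rw [hout.2.2.1 j, hin.2.2.1 j, PySem.List.mem_pyRange_one, hcc, if_pos hP,
            iff_true_intro (by omega : (1 : Int) ≤ 1 + pvCnt rs j)]
        tauto
      · -- seen, no 1 in column j
        rw [hout.2.2.1 j, hin.2.2.1 j, PySem.List.mem_pyRange_one, hcc, if_neg hP, zero_add]
        tauto
      · -- dup, row has a 1 in column j
        rw [hout.2.2.2 j, hin.2.2.2 j, hin.2.2.1 j, PySem.List.mem_pyRange_one, hcc, if_pos hP,
            iff_true_intro (by omega : (1 : Int) ≤ 1 + pvCnt rs j),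
            (by omega : ((2 : Int) ≤ 1 + pvCnt rs j) ↔ 1 ≤ pvCnt rs j)]
        have h21 : (2 : Int) ≤ pvCnt rs j → 1 ≤ pvCnt rs j := by omega
        tauto
      · -- dup, no 1 in column j
        rw [hout.2.2.2 j, hin.2.2.2 j, hin.2.2.1 j, PySem.List.mem_pyRange_one, hcc, if_neg hP,
            zero_add]
        tauto

-- ===== VERDICT (by name: the statement is the Claim_ definition above) =====
theorem dividable_check_spec : Claim_equal_dividable_check := by
  intro m _ _
  show dividable_check m = dividable_check_alt m
  unfold dividable_check dividable_check_alt
  dsimp only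
  set w : Nat := (PySem.List.pyGetD m 0 []).length with hw
  -- A's loop builds the filtered index list
  rw [PySem.List.foldl_append_ite_eq_filter
        (fun i => m.foldl (fun c a => if PySem.List.pyGetD a i 0 = 1 then c + 1 else c) 0 ≥ 2),
      List.nil_append]
  -- A's filter list, named
  set ys : List Int :=
    (PySem.List.pyRange 0 (w : Int) 1).filter
      (fun i => decide (m.foldl (fun c a => if PySem.List.pyGetD a i 0 = 1 then c + 1 else c) (0 : Int) ≥ 2))
    with hys
  -- B's dup set has exactly ys's members
  have hset := outer_sets m w PySem.Set.empty PySem.Set.empty (by simp [PySem.Set.empty]) (by simp [PySem.Set.empty])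
  dsimp only at hset
  set dup : PySem.Set Int :=
    (m.foldl (fun sd row =>
        (PySem.List.pyRange 0 (w : Int) 1).foldl (fun sd i =>
          if PySem.List.pyGetD row i 0 = 1 then
            if PySem.Set.contains sd.1 i then (sd.1, PySem.Set.add sd.2 i)
            else (PySem.Set.add sd.1 i, sd.2)
          else sd) sd) (PySem.Set.empty, PySem.Set.empty)).2 with hdup
  have hmem : ∀ j : Int, j ∈ dup ↔ j ∈ ys := by
    intro j
    rw [hdup, hset.2.2.2 j, hys, List.mem_filter, PySem.List.mem_pyRange_one]
    simp only [PySem.Set.empty, List.not_mem_nil, false_or, false_and]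
    constructor
    · rintro ⟨h1, h2, h3⟩
      refine ⟨⟨h1, h2⟩, decide_eq_true ?_⟩
      rw [ge_iff_le]
      unfold pvCnt at h3
      exact h3
    · rintro ⟨⟨h1, h2⟩, h3⟩
      refine ⟨h1, h2, ?_⟩
      unfold pvCnt
      exact ge_iff_le.mp (of_decide_eq_true h3)
  have hperm : ys.Perm dup := by
    refine (List.perm_ext_iff_of_nodup ?_ hset.2.1).mpr (fun j => (hmem j).symm)
    exact List.Pairwise.filter _ (PySem.List.pairwise_lt_pyRange_one 0 (w : Int)) |>.nodup
  have hsorted : PySem.List.sorted dup (fun x => x) false = ys :=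
    PySem.List.sorted_eq_of_perm_of_pairwise_lt dup ys (fun x => x) hperm
      (List.Pairwise.filter _ (PySem.List.pairwise_lt_pyRange_one 0 (w : Int)))
  rw [hsorted, hys]
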